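-- pv_equiv track=rewrite | github.com/WuYudaPKU/DS101_PekingUniversity | Tree_question/BinaryTree.py | find_path_counts
-- ===== SOURCE A (Python) =====
-- def find_path_counts(i, j):
--     # 计算向左和向右移动的次数
--     left_count = 0
--     right_count = 0
--     while i != 1 and j != 1:
--         if i > j:
--             # 计算向左移动的次数
--             left_count += i // j
--             i %= j
--         else:
--             # 计算向右移动的次数
--             right_count += j // i
--             j %= i
--     # 如果i或j其中一个为1，则剩下的移动次数为另一个数减1
--     if i == 1:
--         right_count += j - 1
--     else:
--         left_count += i - 1
--     return left_count, right_count
-- ===== SOURCE B (Python) =====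
-- def find_path_counts(i, j):
--     # Recursive descent: accumulate the quotient of each Euclid step componentwise.
--     if i == 1:
--         return (0, j - 1)
--     if j == 1:
--         return (i - 1, 0)
--     if i > j:
--         q, r = divmod(i, j)
--         l, rt = find_path_counts(r, j)
--         return (q + l, rt)
--     else:
--         q, r = divmod(j, i)
--         l, rt = find_path_counts(i, r)
--         return (l, q + rt)
-- ===== Notes on version B (the rewrite author's own statement) =====
-- stated objective: alternative
-- what changed: Replaced the while-loop with two mutable accumulators by a recursive descent whose helper returns the (left,right) pair for the remaining subproblem and combines the step's quotient componentwise.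
import Mathlib
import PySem

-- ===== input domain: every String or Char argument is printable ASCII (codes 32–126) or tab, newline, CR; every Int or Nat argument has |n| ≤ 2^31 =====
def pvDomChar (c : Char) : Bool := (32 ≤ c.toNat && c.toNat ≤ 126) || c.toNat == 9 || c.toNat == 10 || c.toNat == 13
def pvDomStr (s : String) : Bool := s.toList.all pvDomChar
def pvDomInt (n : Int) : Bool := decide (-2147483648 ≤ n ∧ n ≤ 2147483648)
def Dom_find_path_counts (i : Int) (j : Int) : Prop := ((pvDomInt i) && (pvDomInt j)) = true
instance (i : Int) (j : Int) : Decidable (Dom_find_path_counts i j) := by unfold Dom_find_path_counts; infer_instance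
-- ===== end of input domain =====

-- B replaces A's accumulator while-loop by a recursive descent returning the pair for the
-- remaining subproblem (alternative decomposition, same cost). Equal on all of Pre_.

-- ===== PORT A =====
-- the while loop, step for step; fuel only makes it total (enough fuel is i.natAbs + j.natAbs)
def pvLoopA (fuel : Nat) (i j lc rc : Int) : Int × Int × Int × Int :=
  match fuel with
  | 0 => (i, j, lc, rc)
  | f + 1 =>
    if i ≠ 1 ∧ j ≠ 1 then
      if i > j then
        pvLoopA f (PySem.Int.mod i j) j (lc + PySem.Int.floordiv i j) rc
      else
        pvLoopA f i (PySem.Int.mod j i) lc (rc + PySem.Int.floordiv j i)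
    else (i, j, lc, rc)

def find_path_counts (i : Int) (j : Int) : Int × Int :=
  let s := pvLoopA (i.natAbs + j.natAbs) i j 0 0
  if s.1 = 1 then (s.2.2.1, s.2.2.2 + s.2.1 - 1) else (s.2.2.1 + s.1 - 1, s.2.2.2)

-- ===== PORT B =====
-- Source B's recursion, step for step; fuel only makes it total
def pvRecB (fuel : Nat) (i j : Int) : Int × Int :=
  match fuel with
  | 0 => (0, 0)
  | f + 1 =>
    if i = 1 then (0, j - 1)
    else if j = 1 then (i - 1, 0)
    else if i > j then
      let q := PySem.Int.floordiv i j
      let p := pvRecB f (PySem.Int.mod i j) j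
      (q + p.1, p.2)
    else
      let q := PySem.Int.floordiv j i
      let p := pvRecB f i (PySem.Int.mod j i)
      (p.1, q + p.2)

def find_path_counts_alt (i : Int) (j : Int) : Int × Int :=
  pvRecB (i.natAbs + j.natAbs) i j

-- ===== PRECONDITION & SPEC =====
-- Pre_ excludes exactly the inputs on which A does not return: with i = 1 or j = 1 A returns at
-- once; otherwise A returns iff both are ≥ 1 and coprime (else it hits division by zero or loops forever).
def Pre_find_path_counts (i : Int) (j : Int) : Prop :=
  i = 1 ∨ j = 1 ∨ (1 ≤ i ∧ 1 ≤ j ∧ Int.gcd i j = 1)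
instance (i : Int) (j : Int) : Decidable (Pre_find_path_counts i j) := by
  unfold Pre_find_path_counts; infer_instance

def pvWitness_find_path_counts : Int × Int := (5, 7)

def Spec_find_path_counts (i : Int) (j : Int) (out : Int × Int) : Prop := out = find_path_counts_alt i j
instance (i : Int) (j : Int) (out : Int × Int) : Decidable (Spec_find_path_counts i j out) := by unfold Spec_find_path_counts; infer_instance

-- ===== CLAIM (what is proved, stated in full; the proofs are below) =====
def Claim_equal_find_path_counts : Prop := ∀ (i : Int) (j : Int), Dom_find_path_counts i j → Pre_find_path_counts i j → Spec_find_path_counts i j (find_path_counts i j)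

-- ===== LEMMAS AND PROOFS =====

-- finishing step of A, applied to the loop's final state
def pvFinishA (s : Int × Int × Int × Int) : Int × Int :=
  if s.1 = 1 then (s.2.2.1, s.2.2.2 + s.2.1 - 1) else (s.2.2.1 + s.1 - 1, s.2.2.2)

theorem pvKey : ∀ (f : Nat) (i j lc rc : Int), 1 ≤ i → 1 ≤ j → Int.gcd i j = 1 →
    i.natAbs + j.natAbs ≤ f →
    pvFinishA (pvLoopA f i j lc rc) = (lc + (pvRecB f i j).1, rc + (pvRecB f i j).2) := by
  intro f
  induction f with
  | zero => intro i j lc rc hi hj _ hf; omega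
  | succ f ih =>
    intro i j lc rc hi hj hg hf
    by_cases h1 : i = 1
    · subst h1
      simp only [pvLoopA, pvRecB, pvFinishA]
      simp only [ne_eq, not_true_eq_false, false_and, if_false, ite_true, Prod.mk.injEq]
      refine ⟨by simp, by ring⟩
    · by_cases h2 : j = 1
      · subst h2
        simp only [pvLoopA, pvRecB, pvFinishA]
        simp [h1, Prod.mk.injEq]
        ring
      · have hi2 : 2 ≤ i := by omega
        have hj2 : 2 ≤ j := by omega
        by_cases hij : i > j
        · -- left step
          have hmod : PySem.Int.mod i j = i % j :=
            PySem.Int.mod_eq_emod_of_pos (by omega : (0:Int) < j)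
          have hr0 : 0 ≤ i % j := Int.emod_nonneg _ (by omega)
          have hrj : i % j < j := Int.emod_lt_of_pos _ (by omega)
          have hrne : i % j ≠ 0 := by
            intro h0
            have hdvd : j.natAbs ∣ i.natAbs :=
              Int.natAbs_dvd_natAbs.mpr (Int.dvd_of_emod_eq_zero h0)
            have hg' : j.natAbs ∣ Nat.gcd i.natAbs j.natAbs := Nat.dvd_gcd hdvd dvd_rfl
            rw [show Nat.gcd i.natAbs j.natAbs = Int.gcd i j from rfl, hg] at hg'
            have := Nat.dvd_one.mp hg'
            omega
          have hr1 : 1 ≤ i % j := by omega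
          have hgcd' : Int.gcd (i % j) j = 1 := by rw [Int.gcd_emod, hg]
          have hbound : (i % j).natAbs + j.natAbs ≤ f := by omega
          rw [show pvLoopA (f+1) i j lc rc
              = pvLoopA f (PySem.Int.mod i j) j (lc + PySem.Int.floordiv i j) rc by
            simp [pvLoopA, h1, h2, hij]]
          rw [show pvRecB (f+1) i j
              = (PySem.Int.floordiv i j + (pvRecB f (PySem.Int.mod i j) j).1,
                 (pvRecB f (PySem.Int.mod i j) j).2) by
            simp [pvRecB, h1, h2, hij]]
          rw [hmod, ih _ _ _ _ hr1 (by omega) hgcd' hbound]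
          simp only [Prod.mk.injEq]
          exact ⟨by ring, trivial⟩
        · -- right step (j ≥ i)
          have hine : i ≠ j := by
            intro h; subst h
            rw [Int.gcd_self] at hg
            omega
          have hmod : PySem.Int.mod j i = j % i :=
            PySem.Int.mod_eq_emod_of_pos (by omega : (0:Int) < i)
          have hr0 : 0 ≤ j % i := Int.emod_nonneg _ (by omega)
          have hri : j % i < i := Int.emod_lt_of_pos _ (by omega)
          have hrne : j % i ≠ 0 := by
            intro h0
            have hdvd : i.natAbs ∣ j.natAbs :=
              Int.natAbs_dvd_natAbs.mpr (Int.dvd_of_emod_eq_zero h0)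
            have hg' : i.natAbs ∣ Nat.gcd i.natAbs j.natAbs := Nat.dvd_gcd dvd_rfl hdvd
            rw [show Nat.gcd i.natAbs j.natAbs = Int.gcd i j from rfl, hg] at hg'
            have := Nat.dvd_one.mp hg'
            omega
          have hr1 : 1 ≤ j % i := by omega
          have hgcd' : Int.gcd i (j % i) = 1 := by
            rw [Int.gcd_comm, Int.gcd_emod, Int.gcd_comm, hg]
          have hbound : i.natAbs + (j % i).natAbs ≤ f := by omega
          rw [show pvLoopA (f+1) i j lc rc
              = pvLoopA f i (PySem.Int.mod j i) lc (rc + PySem.Int.floordiv j i) by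
            simp [pvLoopA, h1, h2, hij]]
          rw [show pvRecB (f+1) i j
              = ((pvRecB f i (PySem.Int.mod j i)).1,
                 PySem.Int.floordiv j i + (pvRecB f i (PySem.Int.mod j i)).2) by
            simp [pvRecB, h1, h2, hij]]
          rw [hmod, ih _ _ _ _ (by omega) hr1 hgcd' hbound]
          simp only [Prod.mk.injEq]
          exact ⟨trivial, by ring⟩

-- ===== VERDICT (by name: the statement is the Claim_ definition above) =====
theorem find_path_counts_spec : Claim_equal_find_path_counts := by
  intro i j _ hpre
  unfold Spec_find_path_counts find_path_counts_alt
  have hfin : find_path_counts i j = pvFinishA (pvLoopA (i.natAbs + j.natAbs) i j 0 0) := rfl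
  rcases hpre with h1 | h2 | ⟨hi, hj, hg⟩
  · subst h1
    rw [hfin, show (1:Int).natAbs + j.natAbs = j.natAbs + 1 by omega]
    simp [pvLoopA, pvRecB, pvFinishA]
  · subst h2
    by_cases h1 : i = 1
    · subst h1
      rw [hfin]
      simp [pvLoopA, pvRecB, pvFinishA]
    · rw [hfin, show i.natAbs + (1:Int).natAbs = i.natAbs + 1 by omega]
      simp [pvLoopA, pvRecB, pvFinishA, h1]
  · rw [hfin, pvKey (i.natAbs + j.natAbs) i j 0 0 hi hj hg le_rfl]
    simp
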